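-- pv_equiv track=rewrite | github.com/IvanKalug-QA/codewars | Split_Strings.py | solution
-- ===== SOURCE A (Python) =====
-- def solution(s):
--     c1 = 0
--     c2 = 2
--     l = []
--     count = 0
--     while count < len(s):
--         if len(s) == 0:
--             break
--         if len(s[c1:c2]) % 2  == 0:
--             l.append(s[c1:c2])
--             c1 += 2
--             c2 += 2
--             count += 2
--         if len(s[c1:c2]) % 2 != 0:
--             l.append(s[c1:c2] + '_')
--             c1 += 2
--             c2 += 2
--             count += 1
--     return l
-- ===== SOURCE B (Python) =====
-- def solution(s):
--     out = []
--     buf = ''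
--     for ch in s:
--         buf += ch
--         if len(buf) == 2:
--             out.append(buf)
--             buf = ''
--     if buf:
--         out.append(buf + '_')
--     return out
-- ===== Notes on version B (the rewrite author's own statement) =====
-- stated objective: alternative
-- what changed: B never slices or indexes: it folds over the characters one at a time, accumulating a small buffer that is flushed to the output whenever it holds two characters, with a final underscore-padded flush for an odd leftover, instead of A's while-loop over index pairs that slices each chunk and parity-checks it twice per iteration.
import Mathlib
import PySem

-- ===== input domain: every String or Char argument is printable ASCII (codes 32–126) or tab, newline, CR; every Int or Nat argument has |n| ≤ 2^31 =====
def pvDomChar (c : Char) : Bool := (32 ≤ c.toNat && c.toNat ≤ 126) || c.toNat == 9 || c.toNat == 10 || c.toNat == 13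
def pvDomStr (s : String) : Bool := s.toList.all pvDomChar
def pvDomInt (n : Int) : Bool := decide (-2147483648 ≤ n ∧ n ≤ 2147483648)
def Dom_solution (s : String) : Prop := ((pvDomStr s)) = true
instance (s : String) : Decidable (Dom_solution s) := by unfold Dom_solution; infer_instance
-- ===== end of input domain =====

-- B replaces A's index-pair while-loop with per-chunk slicing by a character-by-character
-- fold into a small buffer that is flushed whenever it holds two chars (alternative; same value).

-- ===== PORT A =====
-- the while loop of A: state (c1, c2, count, l); the two sequential `if`s of the body are
-- transliterated branch by branch (when the first fires, the second re-reads s[c1:c2] at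
-- the updated indices)
-- fuel only makes the recursion structural: count rises by at least 1 per iteration, so
-- length + 1 units of fuel are never exhausted before the loop condition fails
def solLoopA (cs : List Char) (fuel : Nat) (c1 c2 count : Int) (l : List String) : List String :=
  match fuel with
  | 0 => l
  | fuel + 1 =>
    if count < (cs.length : Int) then
      if cs.length = 0 then l
      else
        let s1 := PySem.List.slice cs (some c1) (some c2)
        if s1.length % 2 = 0 then
          let l1 := l ++ [String.ofList s1]
          let s2 := PySem.List.slice cs (some (c1 + 2)) (some (c2 + 2))
          if s2.length % 2 ≠ 0 then
            solLoopA cs fuel (c1 + 4) (c2 + 4) (count + 3) (l1 ++ [String.ofList (s2 ++ ['_'])])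
          else
            solLoopA cs fuel (c1 + 2) (c2 + 2) (count + 2) l1
        else
          solLoopA cs fuel (c1 + 2) (c2 + 2) (count + 1) (l ++ [String.ofList (s1 ++ ['_'])])
    else l

def solution (s : String) : List String := solLoopA s.toList (s.toList.length + 1) 0 2 0 []

-- ===== PORT B =====
-- Source B's for-loop: fold over the characters with state (out, buf); buf is flushed to out
-- when it reaches length 2, and a non-empty leftover buf is flushed padded with '_'
def solStepB (st : List String × List Char) (ch : Char) : List String × List Char :=
  let buf := st.2 ++ [ch]
  if buf.length = 2 then (st.1 ++ [String.ofList buf], []) else (st.1, buf)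

def solution_alt (s : String) : List String :=
  let st := s.toList.foldl solStepB ([], [])
  if st.2 ≠ [] then st.1 ++ [String.ofList (st.2 ++ ['_'])] else st.1

-- ===== PRECONDITION & SPEC =====
def Spec_solution (s : String) (out : List String) : Prop := out = solution_alt s
instance (s : String) (out : List String) : Decidable (Spec_solution s out) := by unfold Spec_solution; infer_instance

-- ===== CLAIM (what is proved, stated in full; the proofs are below) =====
def Claim_equal_solution : Prop := ∀ (s : String), Dom_solution s → Spec_solution s (solution s)

-- ===== LEMMAS AND PROOFS =====

-- the common value: 2-char chunks with the last odd chunk padded by '_'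
def chunks : List Char → List String
  | [] => []
  | [a] => [String.ofList [a, '_']]
  | a :: b :: r => String.ofList [a, b] :: chunks r

-- B's fold invariant, two characters at a time from an empty buffer
theorem foldB_eq : ∀ (cs : List Char) (out : List String),
    (let st := cs.foldl solStepB (out, [])
     if st.2 ≠ [] then st.1 ++ [String.ofList (st.2 ++ ['_'])] else st.1)
    = out ++ chunks cs := by
  intro cs
  induction cs using chunks.induct with
  | case1 => intro out; simp [chunks]
  | case2 a => intro out; simp [chunks, solStepB]
  | case3 a b r ih =>
    intro out
    have h2 : (a :: b :: r).foldl solStepB (out, [])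
        = r.foldl solStepB (out ++ [String.ofList [a, b]], []) := by
      simp [List.foldl_cons, solStepB]
    simp only [h2]
    rw [ih (out ++ [String.ofList [a, b]])]
    simp [chunks]

theorem alt_eq_chunks (s : String) : solution_alt s = chunks s.toList := by
  have := foldB_eq s.toList []
  simpa [solution_alt] using this

theorem slice_nat (cs : List Char) (i : Nat) :
    PySem.List.slice cs (some (i : Int)) (some ((i : Int) + 2)) = (cs.drop i).take 2 := by
  rw [PySem.List.slice_toNat _ (by omega) (by omega),
    show ((i : Int) + 2).toNat - (i : Int).toNat = 2 by omega,
    show ((i : Int)).toNat = i by omega]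

-- once count has reached the length, the loop returns its accumulator whatever the fuel
theorem solLoopA_exit (cs : List Char) (f : Nat) (c1 c2 count : Int) (l : List String)
    (h : (cs.length : Int) ≤ count) : solLoopA cs f c1 c2 count l = l := by
  cases f with
  | zero => rfl
  | succ f => rw [solLoopA, if_neg (by omega)]

-- A's loop invariant: at state (i, i+2, i) it appends the chunks of the rest of the string
theorem solLoopA_eq : ∀ (fuel : Nat) (cs : List Char) (i : Nat) (l : List String),
    cs.length ≤ i + fuel →
    solLoopA cs fuel (i : Int) ((i : Int) + 2) (i : Int) l = l ++ chunks (cs.drop i) := by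
  intro fuel
  induction fuel with
  | zero =>
    intro cs i l h
    have : cs.drop i = [] := List.drop_eq_nil_of_le (by omega)
    simp [solLoopA, this, chunks]
  | succ n ih =>
    intro cs i l h
    by_cases hi : i < cs.length
    · rw [solLoopA, if_pos (by omega), if_neg (by omega)]
      simp only [slice_nat]
      match hd : cs.drop i with
      | [] =>
        exact absurd (show cs.length - i = 0 by simpa using congrArg List.length hd) (by omega)
      | [a] =>
        have hlen : cs.length = i + 1 := by
          have := hd ▸ (List.length_drop (l := cs) (i := i)); simp at this; omega
        rw [if_neg (by simp)]
        rw [solLoopA_exit _ _ _ _ _ _ (by omega)]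
        simp [chunks]
      | a :: b :: r =>
        have hlen : cs.length = i + 2 + r.length := by
          have := hd ▸ (List.length_drop (l := cs) (i := i)); simp at this; omega
        rw [if_pos (by simp)]
        have hdrop2 : cs.drop (i + 2) = r := by
          rw [← List.drop_drop, hd]; rfl
        have hs2 : PySem.List.slice cs (some ((i:Int) + 2)) (some ((i:Int) + 2 + 2))
            = r.take 2 := by
          rw [show ((i : Int) + 2) = ((i + 2 : Nat) : Int) by push_cast; ring]
          rw [slice_nat cs (i + 2), hdrop2]
        rw [hs2]
        match hr : r with
        | [] =>
          rw [if_neg (by simp)]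
          rw [show ((i : Int) + 2 + 2) = ((i + 2 : Nat) : Int) + 2 by push_cast; ring,
              show ((i : Int) + 2) = ((i + 2 : Nat) : Int) by push_cast; ring]
          rw [ih cs (i + 2) _ (by simp at hlen; omega)]
          simp [hdrop2, chunks]
        | [c] =>
          rw [if_pos (by simp)]
          rw [solLoopA_exit _ _ _ _ _ _ (by simp at hlen; omega)]
          simp [chunks]
        | c :: d :: r' =>
          rw [if_neg (by simp)]
          rw [show ((i : Int) + 2 + 2) = ((i + 2 : Nat) : Int) + 2 by push_cast; ring,
              show ((i : Int) + 2) = ((i + 2 : Nat) : Int) by push_cast; ring]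
          rw [ih cs (i + 2) _ (by simp at hlen; omega)]
          simp [hdrop2, chunks]
    · rw [solLoopA_exit _ _ _ _ _ _ (by omega)]
      have : cs.drop i = [] := List.drop_eq_nil_of_le (by omega)
      simp [this, chunks]

-- ===== VERDICT (by name: the statement is the Claim_ definition above) =====
theorem solution_spec : Claim_equal_solution := by
  intro s _
  unfold Spec_solution solution
  rw [alt_eq_chunks]
  have := solLoopA_eq (s.toList.length + 1) s.toList 0 [] (by omega)
  simpa using this
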